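-- pv_equiv track=rewrite | github.com/karstennoe/reMID.lv2 | converter/swi2remid_backup.py | materialize_arp_offsets
-- ===== SOURCE A (Python) =====
-- WFTABLEPOS = 0x10     # waveform/arp table base (inside the instrument payload)
--
-- def fe_jump_index(lo: int, hi: int, table_base: int, rows_count: int):
--     """
--     Resolve FE ptr (lo,hi) -> row index within a table:
--       ptr = (hi<<8)|lo; row_index = (ptr - table_base) // 3
--     Returns row index or None if out of range/misaligned.
--     """
--     ptr = ((hi & 0xFF) << 8) | (lo & 0xFF)
--     delta = ptr - table_base
--     if delta % 3 != 0:
--         return None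
--     idx = delta // 3
--     return idx if 0 <= idx < rows_count else None
--
-- def arp_byte_to_offset(a: int) -> tuple[bool, int]:
--     """
--     Decode a single ARP byte as per SID-Wizard player:
--
--       0x00..0x7E  => RELATIVE UP by +a semitones            → (True,  +a)
--       0x80        => NOP (no pitch change)                  → (True,  0)
--       0x81..0xDF  => ABSOLUTE note index (not representable
--                      with reMID relative ops)                → (False, 0)
--       0xE0..0xFF  => RELATIVE DOWN (two's-complement)       → (True,  a-256)
--       0x7F        => CHORD CALL (requires external tables)  → (False, 0)
--
--     Return:
--       (is_valid_offset, semitone_offset)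
--       If !is_valid_offset, the caller should keep the previous offset (hold).
--     """
--     if a == 0x80:
--         return True, 0          # NOP
--     if a == 0x7F:
--         return False, 0         # chord call → can't expand without chord tables
--     if a < 0x80:                # relative up
--         return True, a
--     if a >= 0xE0:               # relative down (−32..−1)
--         return True, a - 256
--     # 0x81..0xDF → ABSOLUTE note → not representable with reMID instrument ops
--     return False, 0
--
-- def materialize_arp_offsets(wf_triplets: list[tuple[int,int,int]], step_frames: int):
--     """
--     Read the WF/ARP table's ARP column and turn it into per-frame absolute
--     semitone offsets (relative to the played note).
--
--     Returns:
--       arp_abs          : List[int] length == (#rows * step_frames)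
--       has_loop         : bool (WF table contains an FE jump)
--       loop_start_frame : int  (frame index to loop back to, if has_loop)
--
--     Notes:
--     - We read the raw triplets so we can locate FE in the true source table.
--     - For ABS and CHORD entries we *hold* the previous offset (safest fallback).
--     """
--     has_loop = False
--     loop_row = None
--
--     # Gather linear steps first (until FE/FF)
--     steps = []
--     for (w, a, x) in wf_triplets:
--         if w == 0xFF:
--             break
--         if w == 0xFE:
--             j = fe_jump_index(a, x, WFTABLEPOS, len(wf_triplets))
--             loop_row = j if j is not None else 0
--             has_loop = True
--             break
--         steps.append((w, a, x))
--
--     # If the table is empty, just return zeros for one step worth of frames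
--     if not steps:
--         return [0] * step_frames, False, 0
--
--     # Decode per-row absolute offsets relative to base note
--     arp_per_row = []
--     for (_w, a, _x) in steps:
--         ok, off = arp_byte_to_offset(a)
--         if not ok:
--             # For ABS/chord calls we can't compute a relative delta in reMID,
--             # so we hold previous absolute offset (0 if first row).
--             off = arp_per_row[-1] if arp_per_row else 0
--         arp_per_row.append(off)
--
--     # Compute the frame index where the loop re-enters
--     loop_start_frame = (loop_row or 0) * step_frames if has_loop else 0
--
--     # Expand row-granularity offsets to per-frame offsets
--     arp_abs = []
--     for off in arp_per_row:
--         arp_abs += [off] * step_frames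
--
--     return arp_abs, has_loop, loop_start_frame
-- ===== SOURCE B (Python) =====
-- WFTABLEPOS = 0x10  # waveform/arp table base (inside the instrument payload)
--
-- def materialize_arp_offsets(wf_triplets, step_frames):
--     # Single fused pass: decode each row's arp byte (holding the previous
--     # offset for ABS/chord entries) and emit its frames immediately.
--     n = len(wf_triplets)
--     out = []
--     prev = 0
--     rows = 0
--     has_loop = False
--     loop_row = 0
--     for (w, a, x) in wf_triplets:
--         if w == 0xFF:
--             break
--         if w == 0xFE:
--             ptr = ((x & 0xFF) << 8) | (a & 0xFF)
--             delta = ptr - WFTABLEPOS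
--             if delta % 3 == 0 and 0 <= delta // 3 < n:
--                 loop_row = delta // 3
--             has_loop = True
--             break
--         if a == 0x80:
--             off = 0
--         elif a < 0x80 and a != 0x7F:
--             off = a
--         elif a >= 0xE0:
--             off = a - 256
--         else:
--             off = prev
--         out += [off] * step_frames
--         prev = off
--         rows += 1
--     if rows == 0:
--         return [0] * step_frames, False, 0
--     return out, has_loop, loop_row * step_frames if has_loop else 0
-- ===== Notes on version B (the rewrite author's own statement) =====
-- stated objective: simpler
-- what changed: B fuses A's three separate passes (collect steps, decode with hold, expand to frames) into one loop carrying the previous offset and emitting each row's frames immediately, dropping the intermediate steps/arp_per_row lists.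
import Mathlib
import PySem

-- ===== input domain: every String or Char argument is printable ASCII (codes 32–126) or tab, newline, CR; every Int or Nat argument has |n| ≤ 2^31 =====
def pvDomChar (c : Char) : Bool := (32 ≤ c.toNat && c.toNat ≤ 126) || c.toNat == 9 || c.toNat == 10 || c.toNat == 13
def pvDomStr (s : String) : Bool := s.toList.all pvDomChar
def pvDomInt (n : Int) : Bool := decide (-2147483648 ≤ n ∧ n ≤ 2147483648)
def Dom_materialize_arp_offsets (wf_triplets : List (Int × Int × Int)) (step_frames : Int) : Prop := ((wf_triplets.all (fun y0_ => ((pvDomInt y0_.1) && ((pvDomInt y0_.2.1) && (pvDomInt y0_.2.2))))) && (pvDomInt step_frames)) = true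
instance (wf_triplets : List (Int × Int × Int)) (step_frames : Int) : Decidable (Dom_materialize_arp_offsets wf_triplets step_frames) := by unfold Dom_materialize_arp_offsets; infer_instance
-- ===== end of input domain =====

-- B fuses A's three passes (collect steps / decode with hold / expand) into one loop; same results, proved below.

-- ===== PORT A =====
def WFTABLEPOS : Int := 0x10

-- (hi&0xFF)<<8 | (lo&0xFF): the OR operands occupy disjoint bit ranges, so it equals addition; exact.
def fe_jump_index (lo : Int) (hi : Int) (table_base : Int) (rows_count : Int) : Option Int :=
  let ptr := (PySem.Int.mod hi 256) * 256 + PySem.Int.mod lo 256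
  let delta := ptr - table_base
  if PySem.Int.mod delta 3 ≠ 0 then none
  else
    let idx := PySem.Int.floordiv delta 3
    if 0 ≤ idx ∧ idx < rows_count then some idx else none

def arp_byte_to_offset (a : Int) : Bool × Int :=
  if a = 0x80 then (true, 0)
  else if a = 0x7F then (false, 0)
  else if a < 0x80 then (true, a)
  else if a ≥ 0xE0 then (true, a - 256)
  else (false, 0)

-- A's first loop (break on FF/FE): returns (steps, has_loop, loop_row); loop_row defaults to 0
-- ('loop_row or 0' only matters when has_loop, and None/0 both render as 0).
def pvA_scan (n : Int) : List (Int × Int × Int) → List (Int × Int × Int) × Bool × Int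
  | [] => ([], false, 0)
  | (w, a, x) :: rest =>
    if w = 0xFF then ([], false, 0)
    else if w = 0xFE then
      let j := fe_jump_index a x WFTABLEPOS n
      ([], true, j.getD 0)
    else
      let (s, hl, lr) := pvA_scan n rest
      ((w, a, x) :: s, hl, lr)

-- A's second loop: append decoded offset; 'arp_per_row[-1]' is acc.getLast?.
def pvA_decode : List (Int × Int × Int) → List Int → List Int
  | [], acc => acc
  | t :: rest, acc =>
    let (ok, off) := arp_byte_to_offset t.2.1
    let off2 := if ok then off else (acc.getLast?).getD 0
    pvA_decode rest (acc ++ [off2])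

-- A's third loop: 'arp_abs += [off] * step_frames' ([x]*k is empty for k ≤ 0, hence toNat).
def pvA_expand (sf : Int) : List Int → List Int
  | [] => []
  | off :: rest => List.replicate sf.toNat off ++ pvA_expand sf rest

def materialize_arp_offsets (wf_triplets : List (Int × Int × Int)) (step_frames : Int) : List Int × Bool × Int :=
  let (steps, has_loop, loop_row) := pvA_scan (wf_triplets.length : Int) wf_triplets
  if steps.isEmpty then (List.replicate step_frames.toNat 0, false, 0)
  else
    let arp_per_row := pvA_decode steps []
    let loop_start_frame := if has_loop then loop_row * step_frames else 0
    (pvA_expand step_frames arp_per_row, has_loop, loop_start_frame)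

-- ===== PORT B =====
-- B's single fused loop: (out, rows, has_loop, loop_row).
def pvB_loop (n : Int) (sf : Int) : List (Int × Int × Int) → List Int → Int → Int → List Int × Int × Bool × Int
  | [], out, _, rows => (out, rows, false, 0)
  | (w, a, x) :: rest, out, prev, rows =>
    if w = 0xFF then (out, rows, false, 0)
    else if w = 0xFE then
      let ptr := (PySem.Int.mod x 256) * 256 + PySem.Int.mod a 256
      let delta := ptr - 0x10
      let lr := if PySem.Int.mod delta 3 = 0 ∧ 0 ≤ PySem.Int.floordiv delta 3 ∧ PySem.Int.floordiv delta 3 < n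
                then PySem.Int.floordiv delta 3 else 0
      (out, rows, true, lr)
    else
      let off := if a = 0x80 then 0
        else if a < 0x80 ∧ a ≠ 0x7F then a
        else if a ≥ 0xE0 then a - 256
        else prev
      pvB_loop n sf rest (out ++ List.replicate sf.toNat off) off (rows + 1)

def materialize_arp_offsets_alt (wf_triplets : List (Int × Int × Int)) (step_frames : Int) : List Int × Bool × Int :=
  let (out, rows, hl, lr) := pvB_loop (wf_triplets.length : Int) step_frames wf_triplets [] 0 0
  if rows = 0 then (List.replicate step_frames.toNat 0, false, 0)
  else (out, hl, if hl then lr * step_frames else 0)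

-- ===== PRECONDITION & SPEC =====
def Spec_materialize_arp_offsets (wf_triplets : List (Int × Int × Int)) (step_frames : Int) (out : List Int × Bool × Int) : Prop := out = materialize_arp_offsets_alt wf_triplets step_frames
instance (wf_triplets : List (Int × Int × Int)) (step_frames : Int) (out : List Int × Bool × Int) : Decidable (Spec_materialize_arp_offsets wf_triplets step_frames out) := by unfold Spec_materialize_arp_offsets; infer_instance

-- ===== CLAIM (what is proved, stated in full; the proofs are below) =====
def Claim_equal_materialize_arp_offsets : Prop := ∀ (wf_triplets : List (Int × Int × Int)) (step_frames : Int), Dom_materialize_arp_offsets wf_triplets step_frames → Spec_materialize_arp_offsets wf_triplets step_frames (materialize_arp_offsets wf_triplets step_frames)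

-- ===== LEMMAS AND PROOFS =====

-- B's inline FE handling equals A's fe_jump_index followed by 'j or 0'.
theorem fe_lr (a x n : Int) :
    (if PySem.Int.mod ((PySem.Int.mod x 256) * 256 + PySem.Int.mod a 256 - 0x10) 3 = 0 ∧
        0 ≤ PySem.Int.floordiv ((PySem.Int.mod x 256) * 256 + PySem.Int.mod a 256 - 0x10) 3 ∧
        PySem.Int.floordiv ((PySem.Int.mod x 256) * 256 + PySem.Int.mod a 256 - 0x10) 3 < n
      then PySem.Int.floordiv ((PySem.Int.mod x 256) * 256 + PySem.Int.mod a 256 - 0x10) 3 else 0)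
      = (fe_jump_index a x WFTABLEPOS n).getD 0 := by
  simp only [fe_jump_index, WFTABLEPOS]
  split_ifs with h1 h2 h3 <;> first | rfl | (exfalso; tauto)

-- Decoding with the hold-previous rule, started from a given previous offset.
def pvDecodeFrom (prev : Int) : List (Int × Int × Int) → List Int
  | [] => []
  | t :: rest =>
    let (ok, off) := arp_byte_to_offset t.2.1
    let off2 := if ok then off else prev
    off2 :: pvDecodeFrom off2 rest

theorem pvA_decode_eq (steps : List (Int × Int × Int)) (acc : List Int) :
    pvA_decode steps acc = acc ++ pvDecodeFrom ((acc.getLast?).getD 0) steps := by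
  induction steps generalizing acc with
  | nil => simp [pvA_decode, pvDecodeFrom]
  | cons t rest ih =>
    simp only [pvA_decode, pvDecodeFrom, ih]
    simp

theorem pvB_loop_eq (n sf : Int) (rest : List (Int × Int × Int)) :
    ∀ (out : List Int) (prev rows : Int),
    pvB_loop n sf rest out prev rows =
      (out ++ pvA_expand sf (pvDecodeFrom prev (pvA_scan n rest).1),
       rows + ((pvA_scan n rest).1.length : Int),
       (pvA_scan n rest).2.1, (pvA_scan n rest).2.2) := by
  induction rest with
  | nil => intro out prev rows; simp [pvB_loop, pvA_scan, pvDecodeFrom, pvA_expand]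
  | cons t rest ih =>
    intro out prev rows
    obtain ⟨w, a, x⟩ := t
    by_cases hff : w = 0xFF
    · simp [pvB_loop, pvA_scan, hff, pvDecodeFrom, pvA_expand]
    · by_cases hfe : w = 0xFE
      · subst hfe
        simp only [pvB_loop, pvA_scan, if_neg hff, if_true, pvDecodeFrom, pvA_expand,
          List.append_nil, List.length_nil, Nat.cast_zero, add_zero, Prod.mk.injEq]
        exact ⟨trivial, trivial, trivial, fe_lr a x n⟩
      · -- ordinary row: offsets computed by A (decode + hold) and B (inline) agree
        have hoff :
            (if a = 0x80 then (0:Int)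
             else if a < 0x80 ∧ a ≠ 0x7F then a
             else if a ≥ 0xE0 then a - 256
             else prev) =
            (let (ok, off) := arp_byte_to_offset a
             if ok then off else prev) := by
          simp only [arp_byte_to_offset]
          split_ifs <;> simp_all
        simp only [pvB_loop, pvA_scan, hff, hfe, if_false]
        rw [ih]
        cases hs : pvA_scan n rest with
        | mk s p =>
          cases p with
          | mk hl lr =>
            simp only [pvDecodeFrom, pvA_expand, Prod.mk.injEq]
            rw [hoff]
            refine ⟨?_, by push_cast [List.length_cons]; ring, trivial⟩
            cases arp_byte_to_offset a with
            | mk ok off => simp [List.append_assoc]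

theorem pvMain (wf : List (Int × Int × Int)) (sf : Int) :
    materialize_arp_offsets wf sf = materialize_arp_offsets_alt wf sf := by
  unfold materialize_arp_offsets materialize_arp_offsets_alt
  rw [pvB_loop_eq]
  cases hs : pvA_scan (wf.length : Int) wf with
  | mk steps p =>
    cases p with
    | mk hl lr =>
      by_cases hempty : steps = []
      · simp [hempty]
      · have hlen : ((steps.length : Int) = 0) = False := by
          simp [List.length_eq_zero_iff, hempty]
        simp only [List.isEmpty_iff, hempty, if_false, hlen, zero_add]
        rw [pvA_decode_eq]
        simp

-- ===== VERDICT (by name: the statement is the Claim_ definition above) =====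
theorem materialize_arp_offsets_spec : Claim_equal_materialize_arp_offsets := by
  intro wf sf _
  unfold Spec_materialize_arp_offsets
  exact pvMain wf sf
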